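-- pv_equiv track=rewrite | github.com/MeMetoCoco3/Obsidian-Notes-Cleaner | redux.py | redux
-- ===== SOURCE A (Python) =====
-- def redux(data: list[str]) -> str:
--     hyphens = [i for i, x in enumerate(data) if x == "---\n"]
--     # If it does not hyphens it will be because the properties are not set, which means that the file does not need to be cleanes
--     if not hyphens:
--         return ""
--     header = data[hyphens[0] : hyphens[-1] + 1]
--
--     tags = [i for i in header if " -" in i]
--
--     # Headings
--     body = data[hyphens[-1] + 1 :]
--     headings = [i for i, x in enumerate(body) if x[0] == "#" and x[1] == " "]
--     if headings:
--         for heading in reversed(headings):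
--             del body[heading]
--     # Tags
--     body.append("\n### Tags:\n")
--     for tag in tags:
--         body.append(tag)
--
--     return "".join(body)
-- ===== SOURCE B (Python) =====
-- def redux(data: list[str]) -> str:
--     seen = False
--     cand = []
--     tags = []
--     for line in data:
--         if line == "---\n":
--             if seen:
--                 tags.extend(l for l in cand if " -" in l)
--                 cand = []
--             else:
--                 seen = True
--         elif seen:
--             cand.append(line)
--     if not seen:
--         return ""
--     out = [l for l in cand if l[:2] != "# "]
--     out.append("\n### Tags:\n")
--     out.extend(tags)
--     return "".join(out)
-- ===== Notes on version B (the rewrite author's own statement) =====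
-- stated objective: alternative
-- what changed: A builds the list of fence indices with enumerate, slices out header and body, collects heading indices and deletes them back-to-front; B makes one forward streaming pass with a seen-flag state, flushing the accumulated candidate segment into the tag list at every repeated fence, then filters headings out of the final candidate body.
import Mathlib
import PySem

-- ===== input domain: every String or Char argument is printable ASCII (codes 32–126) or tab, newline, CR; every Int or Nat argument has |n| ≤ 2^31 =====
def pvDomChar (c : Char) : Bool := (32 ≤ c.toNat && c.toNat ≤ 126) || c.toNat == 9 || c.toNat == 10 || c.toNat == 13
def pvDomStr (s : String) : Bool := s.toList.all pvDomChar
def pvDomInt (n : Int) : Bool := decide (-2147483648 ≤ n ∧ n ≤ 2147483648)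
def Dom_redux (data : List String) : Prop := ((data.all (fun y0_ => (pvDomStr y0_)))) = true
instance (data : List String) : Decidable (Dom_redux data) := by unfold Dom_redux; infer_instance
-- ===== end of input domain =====

-- B replaces A's index-building-and-slicing passes by a single forward streaming fold (alternative decomposition); equivalence is about the return value (neither mutates its argument).

-- ===== PORT A =====
-- literal transliteration of A; hyphens[0]/hyphens[-1] are read with headD/getLastD inside the
-- branch where the list is nonempty (Python indexing there always succeeds); `del body[i]` with the
-- valid nonnegative index Python uses there is List.eraseIdx; x[0]/x[1] is pyGet? (none = the
-- IndexError excluded by Pre_).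
def redux (data : List String) : String :=
  let hyphens := (PySem.List.enumerate data).filterMap
    (fun p => if p.2 = "---\n" then some p.1 else none)
  if hyphens = [] then ""
  else
    let header := PySem.List.slice data (some (hyphens.headD 0)) (some (hyphens.getLastD 0 + 1))
    let tags := header.filter (fun i => PySem.Str.isIn " -" i)
    let body := PySem.List.slice data (some (hyphens.getLastD 0 + 1)) none
    let headings := (PySem.List.enumerate body).filterMap
      (fun p => if (PySem.Str.pyGet? p.2 0 == some '#') && (PySem.Str.pyGet? p.2 1 == some ' ')
                then some p.1 else none)
    let body := headings.reverse.foldl (fun b h => b.eraseIdx h.toNat) body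
    let body := body ++ ["\n### Tags:\n"]
    let body := tags.foldl (fun b t => b ++ [t]) body
    PySem.Str.join "" body

-- ===== PORT B =====
-- literal transliteration of Source B: one fold over data carrying the state (seen, cand, tags).
def redux_alt (data : List String) : String :=
  let st := data.foldl
    (fun (s : Bool × List String × List String) line =>
      if line = "---\n" then
        if s.1 then (true, [], s.2.2 ++ s.2.1.filter (fun l => PySem.Str.isIn " -" l))
        else (true, s.2.1, s.2.2)
      else if s.1 then (s.1, s.2.1 ++ [line], s.2.2) else s)
    (false, [], [])
  if st.1 = false then ""
  else PySem.Str.join ""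
    ((st.2.1.filter (fun l => PySem.Str.slice l none (some 2) ≠ "# ")) ++ ["\n### Tags:\n"] ++ st.2.2)

-- ===== PRECONDITION & SPEC =====
-- the lines after the last "---\n" fence (the whole input if no fence is present)
def pvTail (data : List String) : List String :=
  (data.reverse.takeWhile (fun l => l ≠ "---\n")).reverse

-- Pre_ excludes exactly the inputs on which Python A raises IndexError: a fence is present and some
-- line after the last fence is "" (x[0] fails) or "#" (x[1] fails after x[0] == "#").
def Pre_redux (data : List String) : Prop :=
  "---\n" ∈ data → ∀ l ∈ pvTail data, l ≠ "" ∧ l ≠ "#"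
instance (data : List String) : Decidable (Pre_redux data) := by unfold Pre_redux; infer_instance

def pvWitness_redux : List String := ["intro\n", "---\n", " - tag1\n", "---\n", "# head\n", "body\n"]

def Spec_redux (data : List String) (out : String) : Prop := out = redux_alt data
instance (data : List String) (out : String) : Decidable (Spec_redux data out) := by unfold Spec_redux; infer_instance

-- ===== CLAIM (what is proved, stated in full; the proofs are below) =====
def Claim_equal_redux : Prop := ∀ (data : List String), Dom_redux data → Pre_redux data → Spec_redux data (redux data)

-- ===== LEMMAS AND PROOFS =====
def pvIds (c : String → Prop) [DecidablePred c] (xs : List String) (k : Int) : List Int :=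
  (PySem.List.enumerate xs k).filterMap (fun q => if c q.2 then some q.1 else none)

theorem pvIds_cons (c : String → Prop) [DecidablePred c] (x : String) (xs : List String) (k : Int) :
    pvIds c (x :: xs) k = (if c x then [k] else []) ++ pvIds c xs (k + 1) := by
  by_cases hc : c x
  · simp [pvIds, PySem.List.enumerate_cons, hc]
  · simp [pvIds, PySem.List.enumerate_cons, hc]

theorem pvIds_append (c : String → Prop) [DecidablePred c] (xs ys : List String) (k : Int) :
    pvIds c (xs ++ ys) k = pvIds c xs k ++ pvIds c ys (k + xs.length) := by
  simp [pvIds, PySem.List.enumerate_append, List.filterMap_append]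

theorem pvIds_of_not (c : String → Prop) [DecidablePred c] (xs : List String) (k : Int)
    (h : ∀ x ∈ xs, ¬ c x) : pvIds c xs k = [] := by
  induction xs generalizing k with
  | nil => rfl
  | cons x t ih =>
    rw [pvIds_cons]
    simp [h x (by simp), ih _ (fun y hy => h y (by simp [hy]))]

theorem pvIds_nonneg (c : String → Prop) [DecidablePred c] (xs : List String) (k : Int)
    (h : 0 ≤ k) : ∀ i ∈ pvIds c xs k, 0 ≤ i := by
  induction xs generalizing k with
  | nil => simp [pvIds]
  | cons x t ih =>
    intro i hi
    rw [pvIds_cons] at hi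
    rcases List.mem_append.1 hi with h1 | h2
    · split at h1 <;> simp at h1
      omega
    · exact ih (k+1) (by omega) i h2

theorem pvIds_shift (c : String → Prop) [DecidablePred c] (xs : List String) (k : Int) :
    pvIds c xs (k + 1) = (pvIds c xs k).map (· + 1) := by
  induction xs generalizing k with
  | nil => rfl
  | cons x t ih =>
    rw [pvIds_cons, pvIds_cons, List.map_append, ← ih]
    congr 1
    split <;> simp

theorem pv_del_shift (x : String) (t : List String) (L : List Int) (h : ∀ i ∈ L, 0 ≤ i) :
    List.foldl (fun b h => b.eraseIdx h.toNat) (x :: t) (L.map (· + 1)) =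
    x :: List.foldl (fun b h => b.eraseIdx h.toNat) t L := by
  induction L generalizing t with
  | nil => simp
  | cons i L' ih =>
    have h0 : 0 ≤ i := h i (by simp)
    have hti : (i + 1).toNat = i.toNat + 1 := by omega
    simp only [List.map_cons, List.foldl_cons, hti, List.eraseIdx_cons_succ]
    exact ih (t.eraseIdx i.toNat) (fun j hj => h j (by simp [hj]))

theorem pv_del_filter (c : String → Prop) [DecidablePred c] (xs : List String) :
    List.foldl (fun b h => b.eraseIdx h.toNat) xs (pvIds c xs 0).reverse =
    xs.filter (fun x => decide (¬ c x)) := by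
  induction xs with
  | nil => rfl
  | cons x t ih =>
    rw [pvIds_cons, show (0:Int) + 1 = 0 + 1 from rfl, pvIds_shift, List.reverse_append,
        List.foldl_append, List.map_reverse.symm, pv_del_shift x t _ (by
          intro i hi
          exact pvIds_nonneg c t 0 le_rfl i (List.mem_reverse.1 hi)), ih]
    by_cases hc : c x
    · simp [hc]
    · simp [hc]

def pvStep (s : Bool × List String × List String) (line : String) : Bool × List String × List String :=
  if line = "---\n" then
    if s.1 then (true, [], s.2.2 ++ s.2.1.filter (fun l => PySem.Str.isIn " -" l))
    else (true, s.2.1, s.2.2)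
  else if s.1 then (s.1, s.2.1 ++ [line], s.2.2) else s

theorem pvStep_unseen (xs : List String) (h : "---\n" ∉ xs) (c t : List String) :
    xs.foldl pvStep (false, c, t) = (false, c, t) := by
  induction xs with
  | nil => rfl
  | cons x r ih =>
    have hx : x ≠ "---\n" := fun he => h (by simp [he])
    simp only [List.foldl_cons, pvStep, hx, if_false]
    exact ih (fun hm => h (by simp [hm]))

theorem pvStep_seen_nofence (xs : List String) (h : "---\n" ∉ xs) (c t : List String) :
    xs.foldl pvStep (true, c, t) = (true, c ++ xs, t) := by
  induction xs generalizing c with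
  | nil => simp
  | cons x r ih =>
    have hx : x ≠ "---\n" := fun he => h (by simp [he])
    simp only [List.foldl_cons, pvStep, hx, if_false, if_true]
    rw [ih (fun hm => h (by simp [hm])) (c ++ [x])]
    simp

theorem pv_tagp_fence : PySem.Str.isIn " -" "---\n" = false := by decide

theorem pv_tagp_fence' : PySem.Chars.isIn [' ', '-'] ['-', '-', '-', '\n'] = false := by decide

theorem pvStep_flush : ∀ (n : Nat) (m p : List String), m.length ≤ n → "---\n" ∉ p →
    ∀ c t, (m ++ "---\n" :: p).foldl pvStep (true, c, t) =
      (true, p, t ++ (c ++ m).filter (fun l => PySem.Str.isIn " -" l)) := by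
  intro n
  induction n with
  | zero =>
    intro m p hm hp c t
    have hm0 : m = [] := List.length_eq_zero_iff.1 (Nat.le_zero.1 hm)
    subst hm0
    simp only [List.nil_append, List.foldl_cons, pvStep, if_true]
    rw [pvStep_seen_nofence p hp]
    simp
  | succ n ih =>
    intro m p hm hp c t
    by_cases hf : "---\n" ∈ m
    · rcases List.eq_append_cons_of_mem hf with ⟨m1, m2, rfl, hm1⟩
      rw [show (m1 ++ "---\n" :: m2) ++ "---\n" :: p = m1 ++ "---\n" :: (m2 ++ "---\n" :: p) by simp,
          List.foldl_append, pvStep_seen_nofence m1 hm1, List.foldl_cons]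
      simp only [pvStep, if_true, if_pos rfl]
      rw [ih m2 p (by simp at hm; omega) hp]
      simp only [List.filter_append, List.filter_cons, pv_tagp_fence, List.append_assoc,
        List.nil_append, Bool.false_eq_true, if_false]
    · rw [List.foldl_append, pvStep_seen_nofence m hf, List.foldl_cons]
      simp only [pvStep, if_true]
      rw [pvStep_seen_nofence p hp]
      simp

theorem pv_keep_eq (l : String) :
    (decide (¬ (((PySem.Str.pyGet? l 0 == some '#') && (PySem.Str.pyGet? l 1 == some ' ')) = true)))
    = (decide (PySem.Str.slice l none (some 2) ≠ "# ")) := by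
  have h2 : (PySem.Str.slice l none (some 2) = "# ") ↔ (l.toList.take 2 = ['#', ' ']) := by
    rw [← String.toList_inj, PySem.Str.toList_slice, PySem.Chars.slice_eq_listSlice,
        PySem.List.slice_to l.toList (by decide : (0:Int) ≤ 2)]
    rw [show ((2:Int).toNat = 2) from rfl, show "# ".toList = ['#', ' '] from by decide]
  have hg0 : PySem.Str.pyGet? l 0 = l.toList[(0:Nat)]? := by
    simp only [PySem.Str.pyGet?_eq, PySem.Chars.pyGet?_eq_listPyGet?]
    exact PySem.List.pyGet?_natCast l.toList 0
  have hg1 : PySem.Str.pyGet? l 1 = l.toList[(1:Nat)]? := by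
    simp only [PySem.Str.pyGet?_eq, PySem.Chars.pyGet?_eq_listPyGet?]
    exact PySem.List.pyGet?_natCast l.toList 1
  rw [hg0, hg1]
  simp only [ne_eq, h2]
  rcases hl : l.toList with _ | ⟨a, t⟩
  · simp [hl]
  · rcases t with _ | ⟨b, r⟩
    · by_cases ha : a = '#' <;> simp [hl, ha]
    · by_cases ha : a = '#' <;> by_cases hb : b = ' ' <;> simp [hl, ha, hb]

-- ===== main =====

theorem redux_eq (data : List String) :
    redux data =
      (if pvIds (fun x => x = "---\n") data 0 = [] then ""
       else
         PySem.Str.join ""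
           ((List.foldl (fun b h => b.eraseIdx h.toNat)
               (PySem.List.slice data (some ((pvIds (fun x => x = "---\n") data 0).getLastD 0 + 1)) none)
               (pvIds (fun x => ((PySem.Str.pyGet? x 0 == some '#') && (PySem.Str.pyGet? x 1 == some ' ')) = true)
                 (PySem.List.slice data (some ((pvIds (fun x => x = "---\n") data 0).getLastD 0 + 1)) none) 0).reverse
             ++ ["\n### Tags:\n"])
            ++ (PySem.List.slice data (some ((pvIds (fun x => x = "---\n") data 0).headD 0))
                 (some ((pvIds (fun x => x = "---\n") data 0).getLastD 0 + 1))).filter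
                (fun i => PySem.Str.isIn " -" i))) := by
  simp only [redux, PySem.List.foldl_append_singleton]
  rfl

theorem redux_alt_eq (data : List String) :
    redux_alt data =
      (if (data.foldl pvStep (false, [], [])).1 = false then ""
       else PySem.Str.join ""
         (((data.foldl pvStep (false, [], [])).2.1.filter
             (fun l => decide (PySem.Str.slice l none (some 2) ≠ "# ")))
           ++ ["\n### Tags:\n"] ++ (data.foldl pvStep (false, [], [])).2.2)) := rfl

theorem redux_eq_alt (data : List String) : redux data = redux_alt data := by
  by_cases hf : "---\n" ∈ data
  · obtain ⟨pre, rest, rfl, hpre⟩ := List.eq_append_cons_of_mem hf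
    have hprn : ∀ x ∈ pre, ¬ x = "---\n" := fun x hx he => hpre (he ▸ hx)
    by_cases hr : "---\n" ∈ rest
    · -- at least two fences
      obtain ⟨as, bs, hsplit, has⟩ := List.eq_append_cons_of_mem (List.mem_reverse.2 hr)
      have hrest : rest = bs.reverse ++ "---\n" :: as.reverse := by
        have h1 := congrArg List.reverse hsplit
        simpa using h1
      subst hrest
      set mid := bs.reverse with hmid
      set post := as.reverse with hpost0
      have hpost : "---\n" ∉ post := fun h => has (by simpa [hpost0] using h)
      have hpon : ∀ x ∈ post, ¬ x = "---\n" := fun x hx he => hpost (he ▸ hx)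
      -- A side
      have hy : pvIds (fun x => x = "---\n") (pre ++ "---\n" :: (mid ++ "---\n" :: post)) 0
          = (pre.length : Int) :: (pvIds (fun x => x = "---\n") mid ((pre.length : Int) + 1)
              ++ [(pre.length : Int) + 1 + (mid.length : Int)]) := by
        rw [pvIds_append, pvIds_of_not _ pre _ hprn, pvIds_cons, pvIds_append, pvIds_cons,
            pvIds_of_not _ post _ hpon]
        simp
      have hhead : ((pre.length : Int) :: (pvIds (fun x => x = "---\n") mid ((pre.length : Int) + 1)
              ++ [(pre.length : Int) + 1 + (mid.length : Int)])).headD 0 = (pre.length : Int) := rfl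
      have hlast : ((pre.length : Int) :: (pvIds (fun x => x = "---\n") mid ((pre.length : Int) + 1)
              ++ [(pre.length : Int) + 1 + (mid.length : Int)])).getLastD 0
            = (pre.length : Int) + 1 + (mid.length : Int) := by
        rw [show ((pre.length : Int) :: (pvIds (fun x => x = "---\n") mid ((pre.length : Int) + 1)
              ++ [(pre.length : Int) + 1 + (mid.length : Int)]))
            = ((pre.length : Int) :: pvIds (fun x => x = "---\n") mid ((pre.length : Int) + 1))
              ++ [(pre.length : Int) + 1 + (mid.length : Int)] by simp]
        exact List.getLastD_concat
      have hheader : PySem.List.slice (pre ++ "---\n" :: (mid ++ "---\n" :: post))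
            (some (pre.length : Int)) (some ((pre.length : Int) + 1 + (mid.length : Int) + 1))
          = "---\n" :: (mid ++ ["---\n"]) := by
        rw [show ((pre.length : Int) + 1 + (mid.length : Int) + 1)
              = (((pre.length + mid.length + 2 : Nat)) : Int) by push_cast; ring,
            PySem.List.slice_natCast, List.drop_left,
            show pre.length + mid.length + 2 - pre.length = mid.length + 2 by omega,
            List.take_cons, show mid.length + 2 - 1 = mid.length + 1 by omega]
        congr 1
        rw [List.take_append]
        simp
        omega
      have hbody : PySem.List.slice (pre ++ "---\n" :: (mid ++ "---\n" :: post))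
            (some ((pre.length : Int) + 1 + (mid.length : Int) + 1)) none = post := by
        rw [PySem.List.slice_from _ (by positivity),
            show ((pre.length : Int) + 1 + (mid.length : Int) + 1).toNat
              = pre.length + 1 + mid.length + 1 by omega,
            show pre ++ "---\n" :: (mid ++ "---\n" :: post)
              = (pre ++ "---\n" :: (mid ++ ["---\n"])) ++ post by simp,
            List.drop_left' (by simp; omega)]
      -- B side
      have hfold : (pre ++ "---\n" :: (mid ++ "---\n" :: post)).foldl pvStep (false, [], [])
          = (true, post, mid.filter (fun l => PySem.Str.isIn " -" l)) := by
        rw [List.foldl_append, pvStep_unseen pre hpre, List.foldl_cons]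
        simp only [pvStep, if_pos rfl, Bool.false_eq_true, if_false, if_true]
        rw [pvStep_flush mid.length mid post le_rfl hpost]
        simp
      rw [redux_eq, redux_alt_eq, hy, hfold]
      simp only [hhead, hlast]
      rw [hheader, hbody]
      have hne : ((pre.length : Int) :: (pvIds (fun x => x = "---\n") mid ((pre.length : Int) + 1)
              ++ [(pre.length : Int) + 1 + (mid.length : Int)])) ≠ [] := by simp
      rw [if_neg hne]
      simp only [Bool.true_eq_false, if_neg (by simp : ¬ (true = false))]
      rw [pv_del_filter, List.filter_congr (fun x _ => pv_keep_eq x)]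
      simp [List.filter_cons, List.filter_append, pv_tagp_fence, pv_tagp_fence']
    · -- exactly one fence
      have hren : ∀ x ∈ rest, ¬ x = "---\n" := fun x hx he => hr (he ▸ hx)
      have hy : pvIds (fun x => x = "---\n") (pre ++ "---\n" :: rest) 0 = [(pre.length : Int)] := by
        rw [pvIds_append, pvIds_of_not _ pre _ hprn, pvIds_cons, pvIds_of_not _ rest _ hren]
        simp
      have hheader : PySem.List.slice (pre ++ "---\n" :: rest)
            (some (pre.length : Int)) (some ((pre.length : Int) + 1)) = ["---\n"] := by
        rw [show ((pre.length : Int) + 1) = (((pre.length + 1 : Nat)) : Int) by push_cast; ring,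
            PySem.List.slice_natCast, List.drop_left,
            show pre.length + 1 - pre.length = 1 by omega]
        rfl
      have hbody : PySem.List.slice (pre ++ "---\n" :: rest)
            (some ((pre.length : Int) + 1)) none = rest := by
        rw [PySem.List.slice_from _ (by positivity),
            show ((pre.length : Int) + 1).toNat = pre.length + 1 by omega,
            show pre ++ "---\n" :: rest = (pre ++ ["---\n"]) ++ rest by simp,
            List.drop_left' (by simp)]
      have hfold : (pre ++ "---\n" :: rest).foldl pvStep (false, [], []) = (true, rest, []) := by
        rw [List.foldl_append, pvStep_unseen pre hpre, List.foldl_cons]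
        simp only [pvStep, if_pos rfl, Bool.false_eq_true, if_false, if_true]
        rw [pvStep_seen_nofence rest hr]
        simp
      rw [redux_eq, redux_alt_eq, hy, hfold]
      rw [if_neg (by simp : ¬ ([(pre.length : Int)] : List Int) = [])]
      simp only [List.headD_cons, show ([((pre.length : Int))]).getLastD 0 = (pre.length : Int) from rfl]
      rw [hheader, hbody]
      simp only [Bool.true_eq_false, if_neg (by simp : ¬ (true = false))]
      rw [pv_del_filter, List.filter_congr (fun x _ => pv_keep_eq x)]
      simp [List.filter_cons, pv_tagp_fence, pv_tagp_fence']
  · have hA : pvIds (fun x => x = "---\n") data 0 = [] :=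
      pvIds_of_not _ _ _ (fun x hx hxf => hf (hxf ▸ hx))
    rw [redux_eq, redux_alt_eq, hA, pvStep_unseen data hf]
    simp

-- ===== VERDICT (by name: the statement is the Claim_ definition above) =====
theorem redux_spec : Claim_equal_redux := by
  intro data _ _
  exact redux_eq_alt data
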